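-- pv_equiv track=rewrite | github.com/nozakifumitaka68-ux/keiri-daiko | core/card_statement.py | _lookup_column
-- ===== SOURCE A (Python) =====
-- COLUMN_ALIASES = {
--     "usage_date": [
--         "利用日", "ご利用日", "使用日", "取引日", "Date", "Usage Date",
--         "Transaction Date", "transaction_date",
--     ],
--     "posting_date": [
--         "計上日", "ご請求日", "請求日", "Posting Date", "posting_date",
--     ],
--     "vendor": [
--         "利用先", "ご利用店舗", "ご利用先", "店舗名", "加盟店名", "摘要",
--         "Description", "Merchant", "vendor",
--     ],
--     "amount": [
--         "金額", "利用金額", "ご利用金額", "請求金額", "Amount", "amount",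
--     ],
--     "card_name": [
--         "カード名", "カード名称", "ご利用カード", "Card", "card_name",
--     ],
--     "memo": [
--         "備考", "メモ", "Memo", "Notes", "notes",
--     ],
-- }
--
-- def _lookup_column(row: dict[str, str], key: str) -> str:
--     """列名揺れを吸収して値を取得"""
--     aliases = COLUMN_ALIASES.get(key, [key])
--     for alias in aliases:
--         if alias in row and row[alias]:
--             return row[alias]
--         # 大文字小文字無視マッチ
--         for k, v in row.items():
--             if k.lower() == alias.lower() and v:
--                 return v
--     return ""
-- ===== SOURCE B (Python) =====
-- COLUMN_ALIASES = {
--     "usage_date": [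
--         "利用日", "ご利用日", "使用日", "取引日", "Date", "Usage Date",
--         "Transaction Date", "transaction_date",
--     ],
--     "posting_date": [
--         "計上日", "ご請求日", "請求日", "Posting Date", "posting_date",
--     ],
--     "vendor": [
--         "利用先", "ご利用店舗", "ご利用先", "店舗名", "加盟店名", "摘要",
--         "Description", "Merchant", "vendor",
--     ],
--     "amount": [
--         "金額", "利用金額", "ご利用金額", "請求金額", "Amount", "amount",
--     ],
--     "card_name": [
--         "カード名", "カード名称", "ご利用カード", "Card", "card_name",
--     ],
--     "memo": [
--         "備考", "メモ", "Memo", "Notes", "notes",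
--     ],
-- }
--
--
-- def _lookup_column(row: dict[str, str], key: str) -> str:
--     """One lowercase index of the row instead of a rescan per alias."""
--     idx = {}
--     for k, v in row.items():
--         lk = k.lower()
--         if v and lk not in idx:
--             idx[lk] = v
--     for alias in COLUMN_ALIASES.get(key, [key]):
--         v = row.get(alias, "")
--         if v:
--             return v
--         hit = idx.get(alias.lower())
--         if hit:
--             return hit
--     return ""
-- ===== Notes on version B (the rewrite author's own statement) =====
-- stated objective: faster
-- what changed: B builds one lowercase first-truthy index of the row once and then does a flat pass over the aliases, instead of A's full case-insensitive rescan of the row for every alias.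
import Mathlib
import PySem

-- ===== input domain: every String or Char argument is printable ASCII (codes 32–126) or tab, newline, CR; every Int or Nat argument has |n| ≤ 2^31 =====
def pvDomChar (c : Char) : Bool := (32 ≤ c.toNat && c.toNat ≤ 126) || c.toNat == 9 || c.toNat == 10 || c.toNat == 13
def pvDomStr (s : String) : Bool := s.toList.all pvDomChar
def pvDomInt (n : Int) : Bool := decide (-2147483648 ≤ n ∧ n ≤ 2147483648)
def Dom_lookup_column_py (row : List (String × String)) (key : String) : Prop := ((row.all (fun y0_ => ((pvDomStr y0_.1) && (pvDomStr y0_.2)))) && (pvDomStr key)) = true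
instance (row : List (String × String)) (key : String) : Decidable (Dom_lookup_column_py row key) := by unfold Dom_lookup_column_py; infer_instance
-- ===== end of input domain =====

-- B replaces A's per-alias rescans of the row by one lowercase first-truthy index built once; return values only (no mutation).

-- ===== PORT A =====
-- the module constant COLUMN_ALIASES (a dict literal), shared by both ports
def pvColumnAliases : PySem.Dict String (List String) := PySem.Dict.ofList [
  ("usage_date", ["利用日", "ご利用日", "使用日", "取引日", "Date", "Usage Date",
                  "Transaction Date", "transaction_date"]),
  ("posting_date", ["計上日", "ご請求日", "請求日", "Posting Date", "posting_date"]),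
  ("vendor", ["利用先", "ご利用店舗", "ご利用先", "店舗名", "加盟店名", "摘要",
              "Description", "Merchant", "vendor"]),
  ("amount", ["金額", "利用金額", "ご利用金額", "請求金額", "Amount", "amount"]),
  ("card_name", ["カード名", "カード名称", "ご利用カード", "Card", "card_name"]),
  ("memo", ["備考", "メモ", "Memo", "Notes", "notes"])]

-- A's inner loop: `for k, v in row.items(): if k.lower() == alias.lower() and v: return v`
def pvScanCI (items : List (String × String)) (al : String) : Option String :=
  match items with
  | [] => none
  | (k, v) :: rest =>
      if (PySem.Str.lower k == PySem.Str.lower al) && (v != "") then some v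
      else pvScanCI rest al

-- A's outer loop over the aliases
def pvLoopA (d : PySem.Dict String String) (aliases : List String) : String :=
  match aliases with
  | [] => ""
  | a :: rest =>
      match d.get? a with
      | some v => if v != "" then v else
          match pvScanCI d.items a with
          | some w => w
          | none => pvLoopA d rest
      | none =>
          match pvScanCI d.items a with
          | some w => w
          | none => pvLoopA d rest

def lookup_column_py (row : List (String × String)) (key : String) : String :=
  let d := PySem.Dict.ofList row
  pvLoopA d (pvColumnAliases.getD key [key])

-- ===== PORT B =====
-- the index build: first truthy value per lowercased column name
def pvIdxStep (idx : PySem.Dict String String) (kv : String × String) : PySem.Dict String String :=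
  let lk := PySem.Str.lower kv.1
  if (kv.2 != "") && !(idx.contains lk) then idx.insert lk kv.2 else idx

def pvBuildIdx (items : List (String × String)) : PySem.Dict String String :=
  items.foldl pvIdxStep PySem.Dict.empty

-- B's flat alias pass
def pvLoopB (d : PySem.Dict String String) (idx : PySem.Dict String String)
    (aliases : List String) : String :=
  match aliases with
  | [] => ""
  | a :: rest =>
      let v := d.getD a ""
      if v != "" then v else
        match idx.get? (PySem.Str.lower a) with
        | some hit => if hit != "" then hit else pvLoopB d idx rest
        | none => pvLoopB d idx rest

def lookup_column_py_alt (row : List (String × String)) (key : String) : String :=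
  let d := PySem.Dict.ofList row
  pvLoopB d (pvBuildIdx d.items) (pvColumnAliases.getD key [key])

-- ===== PRECONDITION & SPEC =====
def Spec_lookup_column_py (row : List (String × String)) (key : String) (out : String) : Prop := out = lookup_column_py_alt row key
instance (row : List (String × String)) (key : String) (out : String) : Decidable (Spec_lookup_column_py row key out) := by unfold Spec_lookup_column_py; infer_instance

-- ===== CLAIM (what is proved, stated in full; the proofs are below) =====
def Claim_equal_lookup_column_py : Prop := ∀ (row : List (String × String)) (key : String), Dom_lookup_column_py row key → Spec_lookup_column_py row key (lookup_column_py row key)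

-- ===== LEMMAS AND PROOFS =====

-- the index holds exactly what A's case-insensitive rescan would find
theorem pvBuildIdx_get (items : List (String × String)) (idx0 : PySem.Dict String String)
    (a : String) :
    (items.foldl pvIdxStep idx0).get? (PySem.Str.lower a)
      = (idx0.get? (PySem.Str.lower a)).or (pvScanCI items a) := by
  have hstep : ∀ (idx : PySem.Dict String String) (k v : String),
      pvIdxStep idx (k, v) = if (v != "") && !(idx.contains (PySem.Str.lower k)) then
        idx.insert (PySem.Str.lower k) v else idx := fun _ _ _ => rfl
  induction items generalizing idx0 with
  | nil => simp [pvScanCI]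
  | cons kv rest ih =>
    obtain ⟨k, v⟩ := kv
    rw [List.foldl_cons, ih]
    by_cases hv : v = ""
    · simp [pvIdxStep, pvScanCI, hv]
    · cases hK : (PySem.Str.lower k == PySem.Str.lower a) with
      | false =>
        have hne : PySem.Str.lower k ≠ PySem.Str.lower a := by
          intro h; rw [h] at hK; simp at hK
        simp only [pvScanCI, hK, Bool.false_and, Bool.false_eq_true, if_false]
        rw [hstep]
        split
        · rw [PySem.Dict.get?_insert_of_ne idx0 v (Ne.symm hne)]
        · rfl
      | true =>
        have hEq : PySem.Str.lower k = PySem.Str.lower a := by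
          exact eq_of_beq hK
        simp only [pvScanCI, hK, Bool.true_and, bne_iff_ne, ne_eq, hv, not_false_iff, if_true]
        rw [hstep]
        cases hc : idx0.contains (PySem.Str.lower k) with
        | true =>
          have hsome : (idx0.get? (PySem.Str.lower a)).isSome := by
            rw [← PySem.Dict.contains_eq_isSome_get?, ← hEq]; exact hc
          obtain ⟨w, hw⟩ := Option.isSome_iff_exists.mp hsome
          simp [hw]
        | false =>
          have hnone : idx0.get? (PySem.Str.lower a) = none := by
            rw [← hEq]
            have h2 := PySem.Dict.contains_eq_isSome_get? (d := idx0) (k := PySem.Str.lower k)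
            rw [hc] at h2
            exact Option.not_isSome_iff_eq_none.mp (by simp [← h2])
          simp only [Bool.not_false, Bool.and_true, bne_iff_ne, ne_eq, hv, not_false_iff, if_true]
          rw [hEq, PySem.Dict.get?_insert_self, hnone]
          simp

-- A's rescan never returns the empty string
theorem pvScanCI_ne_empty (items : List (String × String)) (a w : String)
    (h : pvScanCI items a = some w) : w ≠ "" := by
  induction items with
  | nil => simp [pvScanCI] at h
  | cons kv rest ih =>
    obtain ⟨k, v⟩ := kv
    simp only [pvScanCI] at h
    split at h
    · rename_i hcond
      cases h
      have := (Bool.and_eq_true _ _).mp hcond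
      simpa using this.2
    · exact ih h

-- idx built from d.items answers pvScanCI (idx0 = empty)
theorem pvBuildIdx_get_empty (items : List (String × String)) (a : String) :
    (pvBuildIdx items).get? (PySem.Str.lower a) = pvScanCI items a := by
  rw [pvBuildIdx, pvBuildIdx_get]
  simp [PySem.Dict.get?_empty]

-- the two alias loops agree for every dict
theorem pvLoop_eq (d : PySem.Dict String String) (aliases : List String) :
    pvLoopA d aliases = pvLoopB d (pvBuildIdx d.items) aliases := by
  induction aliases with
  | nil => rfl
  | cons a rest ih =>
    simp only [pvLoopA, pvLoopB, pvBuildIdx_get_empty]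
    rw [PySem.Dict.getD_eq_get?_getD]
    cases hg : d.get? a with
    | some v =>
      simp only [Option.getD_some]
      by_cases hv : v = ""
      · subst hv
        simp only [bne_self_eq_false, Bool.false_eq_true, if_false]
        cases hs : pvScanCI d.items a with
        | some w => simp [pvScanCI_ne_empty d.items a w hs]
        | none => simpa using ih
      · simp [hv]
    | none =>
      simp only [Option.getD_none, bne_self_eq_false, Bool.false_eq_true, if_false]
      cases hs : pvScanCI d.items a with
      | some w => simp [pvScanCI_ne_empty d.items a w hs]
      | none => simpa using ih

-- ===== VERDICT (by name: the statement is the Claim_ definition above) =====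
theorem lookup_column_py_spec : Claim_equal_lookup_column_py := by
  intro row key _
  unfold Spec_lookup_column_py lookup_column_py lookup_column_py_alt
  exact pvLoop_eq _ _
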